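-- pv_equiv track=rewrite | github.com/grvn/aoc2018 | 15/day15-2.py | shortestroutes
-- ===== SOURCE A (Python) =====
-- from heapq import heappop
-- from heapq import heappush
--
-- def adjacent(positions):
--   return set ((y+dy,x+dx) for y,x in positions for dy,dx in [(0,-1),(-1,0),(0,1),(1,0)])
--
-- def shortestroutes(mypos,targetpos,inuse):
--   res=[]
--   shortest=None
--   been=set(inuse)
--   todo=[(0,[mypos])]
--   while todo:
--     dist,path=heappop(todo)
--     if shortest and len(path)>shortest: # se om vi funnit kortast och gått längre
--       return res
--     currpos=path[-1] # ta sista objekt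
--     if currpos in targetpos: # funnit kortast väg
--       res.append(path)
--       shortest=len(path)
--       continue
--     if currpos in been: # redan besökt
--       continue
--     been.add(currpos)
--     for neigh in adjacent({currpos}):
--       if neigh in been:
--         continue
--       heappush(todo,(dist+1,path+[neigh]))
--   return res
-- ===== SOURCE B (Python) =====
-- def shortestroutes(mypos, targetpos, inuse):
--   # Level-by-level BFS: expand whole distance layers at once, sorting each layer
--   # lexicographically, instead of a heap of (dist, path) items.
--   res = []
--   shortest = None
--   been = set(inuse)
--   level = [[mypos]]
--   while level:
--     if shortest is not None:
--       return res
--     nxt = []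
--     for path in sorted(level):
--       cur = path[-1]
--       if cur in targetpos:
--         res.append(path)
--         shortest = len(path)
--       elif cur not in been:
--         been.add(cur)
--         for dy, dx in ((0, -1), (-1, 0), (0, 1), (1, 0)):
--           n = (cur[0] + dy, cur[1] + dx)
--           if n not in been:
--             nxt.append(path + [n])
--     level = nxt
--   return res
-- ===== Notes on version B (the rewrite author's own statement) =====
-- stated objective: alternative
-- what changed: Replaces the global heap of (dist, path) items popped one at a time by level-by-level BFS: each distance layer is collected as a plain list, sorted lexicographically once per layer, and processed in order.
import Mathlib
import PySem

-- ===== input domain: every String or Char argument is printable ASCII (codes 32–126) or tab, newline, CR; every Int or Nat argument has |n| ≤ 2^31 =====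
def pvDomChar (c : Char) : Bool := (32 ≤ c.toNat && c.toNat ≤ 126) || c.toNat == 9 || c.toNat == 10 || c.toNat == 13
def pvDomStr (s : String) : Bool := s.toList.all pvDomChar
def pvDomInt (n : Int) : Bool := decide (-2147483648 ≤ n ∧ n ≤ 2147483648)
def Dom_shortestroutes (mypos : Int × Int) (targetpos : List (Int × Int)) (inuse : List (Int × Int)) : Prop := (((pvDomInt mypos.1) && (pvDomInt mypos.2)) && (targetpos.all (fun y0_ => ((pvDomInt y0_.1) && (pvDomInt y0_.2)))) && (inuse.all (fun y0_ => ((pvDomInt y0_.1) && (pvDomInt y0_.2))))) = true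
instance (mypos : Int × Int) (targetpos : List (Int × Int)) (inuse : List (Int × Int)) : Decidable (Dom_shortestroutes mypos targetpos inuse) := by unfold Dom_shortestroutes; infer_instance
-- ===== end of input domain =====

-- B replaces A's heap of (dist, path) items by level-by-level BFS with one lexicographic
-- sort per distance layer (objective: alternative decomposition, same exact output).
-- Both ports carry the same fuel bound on the explored distance: the Python diverges when no
-- target is reachable and the free region is unbounded, so a fuel guard is needed for totality.

-- ===== PORT A =====

-- fuel bound on the explored BFS distance, shared by both ports
def pvFuel : Nat := 1073741824

-- Python '<' on (Int, Int) tuples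
def pvPairLt (a b : Int × Int) : Bool := a.1 < b.1 || (a.1 == b.1 && a.2 < b.2)

-- Python '<' on lists of (Int, Int) tuples (lexicographic, shorter prefix is smaller)
def pvPathLt : List (Int × Int) → List (Int × Int) → Bool
  | [], [] => false
  | [], _ :: _ => true
  | _ :: _, [] => false
  | a :: as, b :: bs => pvPairLt a b || (a == b && pvPathLt as bs)

-- Python '<' on the heap items (dist, path)
def pvItemLt (a b : Int × List (Int × Int)) : Bool := a.1 < b.1 || (a.1 == b.1 && pvPathLt a.2 b.2)

-- Python's '<' on tuples compares componentwise; pvCmp is the same order as an Ordering,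
-- used only to key the visited-set tree below
def pvCmp (a b : Int × Int) : Ordering :=
  if a.1 < b.1 then .lt else if b.1 < a.1 then .gt
  else if a.2 < b.2 then .lt else if b.2 < a.2 then .gt else .eq

-- adjacent({currpos}) : the four distinct neighbours.  Python iterates this set in hash
-- order, but every use feeds a priority queue / an order-insensitive append, and the four
-- items are distinct, so the iteration order is immaterial; we use the tuple order of the
-- (dy,dx) list in `adjacent`.
def pvAdj (p : Int × Int) : List (Int × Int) := [(p.1, p.2 - 1), (p.1 - 1, p.2), (p.1, p.2 + 1), (p.1 + 1, p.2)]

-- heappush into the heap modelled as the sorted list of its items (heappop = head);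
-- exact because all items in A's heap are distinct, so the pop order is the sorted order.
-- The insertion walks from the back (new items are usually largest), which is the same
-- sorted list but far cheaper to evaluate.
def pvHeapPushRev (it : Int × List (Int × Int)) : List (Int × List (Int × Int)) → List (Int × List (Int × Int))
  | [] => [it]
  | h :: t => if pvItemLt it h then h :: pvHeapPushRev it t else it :: h :: t

def pvHeapPush (it : Int × List (Int × Int)) (l : List (Int × List (Int × Int))) : List (Int × List (Int × Int)) :=
  (pvHeapPushRev it l.reverse).reverse

-- termination potential for A's loop (proof-only, never evaluated)
def pvPhi (fuel : Nat) (todo : List (Int × List (Int × Int))) : Nat :=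
  (todo.map (fun it => 5 ^ ((fuel : Int) + 1 - it.1).toNat)).sum

theorem pvPhi_cons (fuel : Nat) (a : Int) (b : List (Int × Int)) (l : List (Int × List (Int × Int))) :
    pvPhi fuel ((a, b) :: l) = 5 ^ ((fuel : Int) + 1 - a).toNat + pvPhi fuel l := by
  simp [pvPhi]

theorem pvPhi_reverse (fuel : Nat) (l : List (Int × List (Int × Int))) :
    pvPhi fuel l.reverse = pvPhi fuel l := by
  simp [pvPhi, List.map_reverse, List.sum_reverse]

theorem pvPhi_pushRev (fuel : Nat) (a : Int) (b : List (Int × Int)) (l : List (Int × List (Int × Int))) :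
    pvPhi fuel (pvHeapPushRev (a, b) l) = 5 ^ ((fuel : Int) + 1 - a).toNat + pvPhi fuel l := by
  induction l with
  | nil => simp [pvHeapPushRev, pvPhi]
  | cons h t ih =>
    obtain ⟨x, y⟩ := h
    simp only [pvHeapPushRev]
    split
    · simp only [pvPhi, List.map, List.sum_cons] at ih ⊢
      omega
    · simp [pvPhi]

theorem pvPhi_push (fuel : Nat) (a : Int) (b : List (Int × Int)) (l : List (Int × List (Int × Int))) :
    pvPhi fuel (pvHeapPush (a, b) l) = 5 ^ ((fuel : Int) + 1 - a).toNat + pvPhi fuel l := by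
  rw [pvHeapPush, pvPhi_reverse, pvPhi_pushRev, pvPhi_reverse]

theorem pvPhi_fold_le (fuel : Nat) (d : Int) (p : List (Int × Int)) (c : (Int × Int) → Bool) :
    ∀ (ns : List (Int × Int)) (l : List (Int × List (Int × Int))),
    pvPhi fuel (ns.foldl (fun td n => if c n then td else pvHeapPush (d + 1, p ++ [n]) td) l)
      ≤ pvPhi fuel l + ns.length * 5 ^ ((fuel : Int) + 1 - (d + 1)).toNat := by
  intro ns
  induction ns with
  | nil => intro l; simp
  | cons n ns ih =>
    intro l
    simp only [List.foldl_cons, List.length_cons]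
    have hmul : (ns.length + 1) * 5 ^ ((fuel : Int) + 1 - (d + 1)).toNat
        = ns.length * 5 ^ ((fuel : Int) + 1 - (d + 1)).toNat
          + 5 ^ ((fuel : Int) + 1 - (d + 1)).toNat := by ring
    have hpos : 0 < 5 ^ ((fuel : Int) + 1 - (d + 1)).toNat := pow_pos (by norm_num) _
    cases hc : c n
    · simp only [Bool.false_eq_true, if_false]
      have h1 := ih (pvHeapPush (d + 1, p ++ [n]) l)
      rw [pvPhi_push] at h1
      omega
    · simp only [if_true]
      have h1 := ih l
      omega

-- literal port of A's while loop; the heap is the sorted list of its items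
-- Python's 'been' hash set: modelled by an ordered tree set (only membership and insert
-- are used, its iteration order is never consumed), so the port evaluates like Python's O(1) set
def pvAloop (targetpos : List (Int × Int)) (fuel : Nat) (been : Std.TreeSet (Int × Int) pvCmp)
    (res : List (List (Int × Int))) (shortest : Option Int)
    (todo : List (Int × List (Int × Int))) : List (List (Int × Int)) :=
  match todo with
  | [] => res
  | (dist, path) :: rest =>
    if hguard : fuel ≤ dist.toNat then res   -- fuel guard only (not in the Python)
    else if (match shortest with | some s => decide (s < (path.length : Int)) | none => false) then res
    else
      match PySem.List.pyGet? path (-1) with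
      | none => res   -- unreachable: every queued path is nonempty
      | some currpos =>
        if targetpos.contains currpos then
          pvAloop targetpos fuel been (res ++ [path]) (some (path.length : Int)) rest
        else if been.contains currpos then
          pvAloop targetpos fuel been res shortest rest
        else
          pvAloop targetpos fuel (been.insert currpos) res shortest
            ((pvAdj currpos).foldl
              (fun td n => if (been.insert currpos).contains n then td
                           else pvHeapPush (dist + 1, path ++ [n]) td) rest)
termination_by pvPhi fuel todo
decreasing_by
  · rw [pvPhi_cons]
    have h5 : 0 < 5 ^ ((fuel : Int) + 1 - dist).toNat := pow_pos (by norm_num) _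
    omega
  · rw [pvPhi_cons]
    have h5 : 0 < 5 ^ ((fuel : Int) + 1 - dist).toNat := pow_pos (by norm_num) _
    omega
  · simp only [dite_eq_ite]
    rw [pvPhi_cons]
    have hb := pvPhi_fold_le fuel dist path
      (fun n => (been.insert currpos).contains n) (pvAdj currpos) rest
    have hlen : (pvAdj currpos).length = 4 := rfl
    rw [hlen] at hb
    have hk : ((fuel : Int) + 1 - dist).toNat = ((fuel : Int) + 1 - (dist + 1)).toNat + 1 := by omega
    have h5 : 0 < 5 ^ ((fuel : Int) + 1 - (dist + 1)).toNat := pow_pos (by norm_num) _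
    rw [hk, pow_succ]
    omega

def shortestroutes (mypos : Int × Int) (targetpos : List (Int × Int)) (inuse : List (Int × Int)) : List (List (Int × Int)) :=
  pvAloop targetpos pvFuel (Std.TreeSet.ofList inuse pvCmp) [] none [(0, [mypos])]

-- ===== PORT B =====

-- Python's '<=' on paths (for sorting)
def pvPathLe (a b : List (Int × Int)) : Bool := !pvPathLt b a

-- the builtin sorted(level), ported as the library merge sort; the lexicographic order is
-- total and antisymmetric, so every correct sort returns the same list as Python's sorted
def pvSortPaths (l : List (List (Int × Int))) : List (List (Int × Int)) :=
  l.mergeSort pvPathLe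

-- the for-loop over one sorted level: returns (been, res, shortest, nxt)
def pvGo (targetpos : List (Int × Int)) (been : Std.TreeSet (Int × Int) pvCmp)
    (res : List (List (Int × Int))) (shortest : Option Int) (nxt : List (List (Int × Int))) :
    List (List (Int × Int)) →
    Std.TreeSet (Int × Int) pvCmp × List (List (Int × Int)) × Option Int × List (List (Int × Int))
  | [] => (been, res, shortest, nxt)
  | path :: ps =>
    match PySem.List.pyGet? path (-1) with
    | none => pvGo targetpos been res shortest nxt ps   -- unreachable: queued paths are nonempty
    | some cur =>
      if targetpos.contains cur then
        pvGo targetpos been (res ++ [path]) (some (path.length : Int)) nxt ps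
      else if been.contains cur then
        pvGo targetpos been res shortest nxt ps
      else
        pvGo targetpos (been.insert cur) res shortest
          ((pvAdj cur).foldl
            (fun nx n => if (been.insert cur).contains n then nx
                         else nx ++ [path ++ [n]]) nxt) ps

-- the while loop over levels (same fuel guard on the explored distance as port A)
def pvBloop (targetpos : List (Int × Int)) : Nat → Std.TreeSet (Int × Int) pvCmp →
    List (List (Int × Int)) → Option Int → List (List (Int × Int)) → List (List (Int × Int))
  | 0, _, res, _, _ => res
  | fuel + 1, been, res, shortest, level =>
    match level with
    | [] => res
    | _ :: _ =>
      if shortest.isSome then res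
      else
        match pvGo targetpos been res shortest [] (pvSortPaths level) with
        | (been2, res2, shortest2, nxt) => pvBloop targetpos fuel been2 res2 shortest2 nxt

def shortestroutes_alt (mypos : Int × Int) (targetpos : List (Int × Int)) (inuse : List (Int × Int)) : List (List (Int × Int)) :=
  pvBloop targetpos pvFuel (Std.TreeSet.ofList inuse pvCmp) [] none [[mypos]]

-- ===== PRECONDITION & SPEC =====
def Spec_shortestroutes (mypos : Int × Int) (targetpos : List (Int × Int)) (inuse : List (Int × Int)) (out : List (List (Int × Int))) : Prop := out = shortestroutes_alt mypos targetpos inuse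
instance (mypos : Int × Int) (targetpos : List (Int × Int)) (inuse : List (Int × Int)) (out : List (List (Int × Int))) : Decidable (Spec_shortestroutes mypos targetpos inuse out) := by unfold Spec_shortestroutes; infer_instance

-- ===== CLAIM (what is proved, stated in full; the proofs are below) =====
def Claim_equal_shortestroutes : Prop := ∀ (mypos : Int × Int) (targetpos : List (Int × Int)) (inuse : List (Int × Int)), Dom_shortestroutes mypos targetpos inuse → Spec_shortestroutes mypos targetpos inuse (shortestroutes mypos targetpos inuse)

-- ===== LEMMAS AND PROOFS =====

theorem pvAloop_nil (tp : List (Int × Int)) (F : Nat) (been : Std.TreeSet (Int × Int) pvCmp)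
    (res : List (List (Int × Int))) (shortest : Option Int) :
    pvAloop tp F been res shortest [] = res := by
  rw [pvAloop.eq_def]

theorem pvAloop_cons (tp : List (Int × Int)) (F : Nat) (been : Std.TreeSet (Int × Int) pvCmp)
    (res : List (List (Int × Int))) (shortest : Option Int) (dist : Int)
    (path : List (Int × Int)) (rest : List (Int × List (Int × Int))) :
    pvAloop tp F been res shortest ((dist, path) :: rest) =
      if F ≤ dist.toNat then res
      else if (match shortest with | some s => decide (s < (path.length : Int)) | none => false) then res
      else
        match PySem.List.pyGet? path (-1) with
        | none => res
        | some currpos =>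
          if tp.contains currpos then
            pvAloop tp F been (res ++ [path]) (some (path.length : Int)) rest
          else if been.contains currpos then
            pvAloop tp F been res shortest rest
          else
            pvAloop tp F (been.insert currpos) res shortest
              ((pvAdj currpos).foldl
                (fun td n => if (been.insert currpos).contains n then td
                             else pvHeapPush (dist + 1, path ++ [n]) td) rest) := by
  rw [pvAloop.eq_def]
  simp only [dite_eq_ite]

theorem pvPathLt_irrefl : ∀ a, pvPathLt a a = false := by
  intro a; induction a with
  | nil => rfl
  | cons h t ih => simp [pvPathLt, pvPairLt, ih]

theorem pvPairLt_trans {a b c : Int × Int} (h1 : pvPairLt a b = true) (h2 : pvPairLt b c = true) :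
    pvPairLt a c = true := by
  obtain ⟨a1, a2⟩ := a; obtain ⟨b1, b2⟩ := b; obtain ⟨c1, c2⟩ := c
  simp only [pvPairLt, Bool.or_eq_true, Bool.and_eq_true, beq_iff_eq, decide_eq_true_eq] at *
  omega

theorem pvPathLt_trans : ∀ a b c : List (Int × Int),
    pvPathLt a b = true → pvPathLt b c = true → pvPathLt a c = true := by
  intro a
  induction a with
  | nil => intro b c h1 h2; cases b <;> cases c <;> simp_all [pvPathLt]
  | cons x xs ih =>
    intro b c h1 h2
    cases b with
    | nil => simp [pvPathLt] at h1
    | cons y ys =>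
      cases c with
      | nil => simp [pvPathLt] at h2
      | cons z zs =>
        simp only [pvPathLt, Bool.or_eq_true, Bool.and_eq_true, beq_iff_eq] at h1 h2 ⊢
        rcases h1 with h1 | ⟨rfl, h1⟩
        · rcases h2 with h2 | ⟨rfl, h2⟩
          · exact Or.inl (pvPairLt_trans h1 h2)
          · exact Or.inl h1
        · rcases h2 with h2 | ⟨rfl, h2⟩
          · exact Or.inl h2
          · exact Or.inr ⟨rfl, ih _ _ h1 h2⟩

theorem pvPathLt_asymm {a b : List (Int × Int)} (h1 : pvPathLt a b = true)
    (h2 : pvPathLt b a = true) : False := by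
  have := pvPathLt_trans a b a h1 h2
  simp [pvPathLt_irrefl] at this

theorem pvPathLt_trichotomy : ∀ a b : List (Int × Int),
    pvPathLt a b = true ∨ pvPathLt b a = true ∨ a = b := by
  intro a
  induction a with
  | nil => intro b; cases b <;> simp [pvPathLt]
  | cons x xs ih =>
    intro b
    cases b with
    | nil => simp [pvPathLt]
    | cons y ys =>
      by_cases hxy : x = y
      · subst hxy
        rcases ih ys with h | h | h
        · exact Or.inl (by simp [pvPathLt, h])
        · exact Or.inr (Or.inl (by simp [pvPathLt, h]))
        · exact Or.inr (Or.inr (by simp [h]))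
      · obtain ⟨x1, x2⟩ := x; obtain ⟨y1, y2⟩ := y
        have : pvPairLt (x1, x2) (y1, y2) = true ∨ pvPairLt (y1, y2) (x1, x2) = true := by
          simp only [pvPairLt, Bool.or_eq_true, Bool.and_eq_true, beq_iff_eq, decide_eq_true_eq]
          by_cases h1 : x1 = y1
          · subst h1
            have : x2 ≠ y2 := by intro h; exact hxy (by simp [h])
            omega
          · omega
        rcases this with h | h
        · exact Or.inl (by simp [pvPathLt, h])
        · exact Or.inr (Or.inl (by simp [pvPathLt, h]))

-- proof-only insertion function matching where pvHeapPush places a path among equal-dist items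
def pvInsRev (x : List (Int × Int)) : List (List (Int × Int)) → List (List (Int × Int))
  | [] => [x]
  | h :: t => if pvPathLt x h then h :: pvInsRev x t else x :: h :: t

def pvInsertPath (x : List (Int × Int)) (l : List (List (Int × Int))) : List (List (Int × Int)) :=
  (pvInsRev x l.reverse).reverse

theorem pvPathLe_trans (a b c : List (Int × Int)) (h1 : pvPathLe a b = true)
    (h2 : pvPathLe b c = true) : pvPathLe a c = true := by
  simp only [pvPathLe, Bool.not_eq_true'] at *
  by_contra hcc
  simp only [Bool.not_eq_false] at hcc
  rcases pvPathLt_trichotomy a b with h | h | h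
  · have := pvPathLt_trans c a b hcc h
    simp [this] at h2
  · simp [h] at h1
  · subst h
    simp [hcc] at h2

theorem pvPathLe_total (a b : List (Int × Int)) : (pvPathLe a b || pvPathLe b a) = true := by
  simp only [pvPathLe, Bool.or_eq_true, Bool.not_eq_true']
  rcases pvPathLt_trichotomy a b with h | h | h
  · exact Or.inl (by by_contra hc; simp only [Bool.not_eq_false] at hc; exact pvPathLt_asymm h hc)
  · exact Or.inr (by by_contra hc; simp only [Bool.not_eq_false] at hc; exact pvPathLt_asymm h hc)
  · subst h; exact Or.inl (by simp [pvPathLt_irrefl])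

theorem pvPathLe_antisymm (a b : List (Int × Int)) (h1 : pvPathLe a b = true)
    (h2 : pvPathLe b a = true) : a = b := by
  simp only [pvPathLe, Bool.not_eq_true'] at h1 h2
  rcases pvPathLt_trichotomy a b with h | h | h
  · exact absurd h (by simp [h2])
  · exact absurd h (by simp [h1])
  · exact h

theorem pvMem_insRev {p x : List (Int × Int)} {s : List (List (Int × Int))} :
    p ∈ pvInsRev x s ↔ p = x ∨ p ∈ s := by
  induction s with
  | nil => simp [pvInsRev]
  | cons h t ih =>
    simp only [pvInsRev]
    split <;> simp only [List.mem_cons, ih] <;> tauto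

theorem pvInsRev_perm (x : List (Int × Int)) (s : List (List (Int × Int))) :
    (pvInsRev x s).Perm (x :: s) := by
  induction s with
  | nil => simp [pvInsRev]
  | cons h t ih =>
    simp only [pvInsRev]
    split
    · exact (ih.cons h).trans (List.Perm.swap x h t)
    · exact List.Perm.refl _

theorem pvInsertPath_perm (x : List (Int × Int)) (l : List (List (Int × Int))) :
    (pvInsertPath x l).Perm (x :: l) := by
  have h1 : (pvInsertPath x l).Perm (pvInsRev x l.reverse) := (List.reverse_perm _)
  have h2 := pvInsRev_perm x l.reverse
  exact h1.trans (h2.trans ((l.reverse_perm).cons x))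

theorem pvInsRev_pairwise (x : List (Int × Int)) (s : List (List (Int × Int)))
    (hs : s.Pairwise (fun a b => pvPathLe b a = true)) :
    (pvInsRev x s).Pairwise (fun a b => pvPathLe b a = true) := by
  induction s with
  | nil => simp [pvInsRev]
  | cons h t ih =>
    rcases List.pairwise_cons.mp hs with ⟨hh, ht⟩
    simp only [pvInsRev]
    split
    · rename_i hlt
      refine List.pairwise_cons.mpr ⟨?_, ih ht⟩
      intro y hy
      rcases pvMem_insRev.mp hy with rfl | hy
      · simp only [pvPathLe, Bool.not_eq_true']
        by_contra hc
        simp only [Bool.not_eq_false] at hc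
        exact pvPathLt_asymm hlt hc
      · exact hh y hy
    · rename_i hnlt
      refine List.pairwise_cons.mpr ⟨?_, hs⟩
      intro y hy
      rcases List.mem_cons.mp hy with rfl | hy
      · simpa [pvPathLe] using hnlt
      · have hhy := hh y hy
        simp only [pvPathLe, Bool.not_eq_true'] at hhy ⊢
        by_contra hcq
        simp only [Bool.not_eq_false] at hcq
        rcases pvPathLt_trichotomy y h with h' | h' | h'
        · have := pvPathLt_trans x y h hcq h'
          simp [this] at hnlt
        · simp [h'] at hhy
        · subst h'
          simp [hcq] at hnlt

theorem pvInsertPath_pairwise (x : List (Int × Int)) (l : List (List (Int × Int)))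
    (hl : l.Pairwise (fun a b => pvPathLe a b = true)) :
    (pvInsertPath x l).Pairwise (fun a b => pvPathLe a b = true) := by
  rw [pvInsertPath, List.pairwise_reverse]
  exact pvInsRev_pairwise x l.reverse (List.pairwise_reverse.mpr hl)

theorem pvSortPaths_pairwise (l : List (List (Int × Int))) :
    (pvSortPaths l).Pairwise (fun a b => pvPathLe a b = true) :=
  List.sorted_mergeSort pvPathLe_trans pvPathLe_total l

theorem pvSortPaths_append_singleton (l : List (List (Int × Int))) (x : List (Int × Int)) :
    pvSortPaths (l ++ [x]) = pvInsertPath x (pvSortPaths l) := by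
  refine List.eq_of_perm_of_sorted (fun a b _ _ hab hba => pvPathLe_antisymm a b hab hba)
    (pvSortPaths_pairwise (l ++ [x]))
    (pvInsertPath_pairwise x _ (pvSortPaths_pairwise l)) ?_
  have h1 : (pvSortPaths (l ++ [x])).Perm (l ++ [x]) := List.mergeSort_perm _ _
  have h2 : (pvInsertPath x (pvSortPaths l)).Perm (x :: l) :=
    (pvInsertPath_perm x _).trans ((List.mergeSort_perm l pvPathLe).cons x)
  exact h1.trans ((List.perm_append_singleton x l).trans h2.symm)

theorem pvMem_sortPaths {p : List (Int × Int)} {l : List (List (Int × Int))} :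
    p ∈ pvSortPaths l ↔ p ∈ l := List.mem_mergeSort

theorem pvSortPaths_ne_nil {l : List (List (Int × Int))} (h : l ≠ []) : pvSortPaths l ≠ [] := by
  intro hc
  have := List.length_mergeSort (le := pvPathLe) l
  rw [show l.mergeSort pvPathLe = pvSortPaths l from rfl, hc] at this
  exact h (List.eq_nil_of_length_eq_zero this.symm)

theorem pvHeapPushRev_append (it : Int × List (Int × Int)) :
    ∀ (m r : List (Int × List (Int × Int))), (∀ h ∈ r, pvItemLt it h = false) →
    pvHeapPushRev it (m ++ r) = pvHeapPushRev it m ++ r := by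
  intro m
  induction m with
  | nil =>
    intro r hr
    cases r with
    | nil => rfl
    | cons h t =>
      simp only [List.nil_append, pvHeapPushRev, hr h (by simp), Bool.false_eq_true, if_false]
      rfl
  | cons h m ih =>
    intro r hr
    simp only [List.cons_append, pvHeapPushRev]
    split
    · rw [ih r hr]
      rfl
    · rfl

theorem pvHeapPush_skip (d : Int) (x : List (Int × Int)) :
    ∀ (cs : List (List (Int × Int))) (l : List (Int × List (Int × Int))),
    pvHeapPush (d + 1, x) (cs.map (fun p => (d, p)) ++ l)
      = cs.map (fun p => (d, p)) ++ pvHeapPush (d + 1, x) l := by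
  intro cs l
  have hlt : ∀ h ∈ (cs.map (fun p => (d, p))).reverse, pvItemLt (d + 1, x) h = false := by
    intro h hh
    rw [List.mem_reverse, List.mem_map] at hh
    obtain ⟨c, _, rfl⟩ := hh
    simp only [pvItemLt, Bool.or_eq_false_iff, Bool.and_eq_false_iff]
    constructor
    · simp only [decide_eq_false_iff_not]; omega
    · left; simp only [beq_eq_false_iff_ne, ne_eq]; omega
  rw [pvHeapPush, pvHeapPush, List.reverse_append,
    pvHeapPushRev_append _ _ _ hlt, List.reverse_append, List.reverse_reverse]

theorem pvHeapPushRev_map (d : Int) (x : List (Int × Int)) :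
    ∀ (m : List (List (Int × Int))),
    pvHeapPushRev (d + 1, x) (m.map (fun p => (d + 1, p)))
      = (pvInsRev x m).map (fun p => (d + 1, p)) := by
  intro m
  induction m with
  | nil => simp [pvHeapPushRev, pvInsRev]
  | cons q m ih =>
    have heq : pvItemLt (d + 1, x) (d + 1, q) = pvPathLt x q := by
      simp [pvItemLt]
    simp only [List.map_cons, pvHeapPushRev, pvInsRev, heq]
    split <;> simp_all

theorem pvHeapPush_next (d : Int) (x : List (Int × Int)) :
    ∀ (nxt : List (List (Int × Int))),
    pvHeapPush (d + 1, x) (nxt.map (fun p => (d + 1, p)))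
      = (pvInsertPath x nxt).map (fun p => (d + 1, p)) := by
  intro nxt
  rw [pvHeapPush, pvInsertPath, ← List.map_reverse, pvHeapPushRev_map, List.map_reverse]

theorem pvFold_bridge (d : Int) (p : List (Int × Int)) (c : (Int × Int) → Bool)
    (cs : List (List (Int × Int))) :
    ∀ (ns : List (Int × Int)) (nxtB : List (List (Int × Int))),
    ns.foldl (fun td n => if c n then td else pvHeapPush (d + 1, p ++ [n]) td)
        (cs.map (fun q => (d, q)) ++ (pvSortPaths nxtB).map (fun q => (d + 1, q)))
      = cs.map (fun q => (d, q))
        ++ (pvSortPaths (ns.foldl (fun nx n => if c n then nx else nx ++ [p ++ [n]]) nxtB)).map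
              (fun q => (d + 1, q)) := by
  intro ns
  induction ns with
  | nil => intro nxtB; simp
  | cons n ns ih =>
    intro nxtB
    simp only [List.foldl_cons]
    by_cases hc : c n
    · simp only [hc, if_true]; exact ih nxtB
    · simp only [hc, if_false]
      rw [pvHeapPush_skip, pvHeapPush_next, ← pvSortPaths_append_singleton]
      exact ih (nxtB ++ [p ++ [n]])

theorem pvGo_mem_fold {q : List (Int × Int)} (c : (Int × Int) → Bool) (p : List (Int × Int)) :
    ∀ (ns : List (Int × Int)) (nxt : List (List (Int × Int))),
    q ∈ ns.foldl (fun nx n => if c n then nx else nx ++ [p ++ [n]]) nxt →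
    q ∈ nxt ∨ ∃ n, q = p ++ [n] := by
  intro ns
  induction ns with
  | nil => intro nxt h; exact Or.inl h
  | cons n ns ih =>
    intro nxt h
    simp only [List.foldl_cons] at h
    by_cases hc : c n
    · rw [if_pos hc] at h; exact ih nxt h
    · rw [if_neg hc] at h
      rcases ih _ h with h' | h'
      · rcases List.mem_append.mp h' with h'' | h''
        · exact Or.inl h''
        · exact Or.inr ⟨n, by simpa using h''⟩
      · exact Or.inr h'

theorem pvGo_shape (tp : List (Int × Int)) (d : Nat) :
    ∀ (paths nxt : List (List (Int × Int))) (been : Std.TreeSet (Int × Int) pvCmp)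
      (res : List (List (Int × Int))) (shortest : Option Int),
    (∀ p ∈ paths, p.length = d + 1) →
    (∀ p ∈ nxt, p.length = d + 2) →
    (shortest = none ∨ shortest = some ((d : Int) + 1)) →
    (∀ p ∈ (pvGo tp been res shortest nxt paths).2.2.2, p.length = d + 2) ∧
    ((pvGo tp been res shortest nxt paths).2.2.1 = none ∨
      (pvGo tp been res shortest nxt paths).2.2.1 = some ((d : Int) + 1)) := by
  intro paths
  induction paths with
  | nil => intro nxt been res shortest _ h2 h3; exact ⟨h2, h3⟩
  | cons p ps ih =>
    intro nxt been res shortest h1 h2 h3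
    have hp : p.length = d + 1 := h1 p (by simp)
    have hps : ∀ q ∈ ps, q.length = d + 1 := fun q hq => h1 q (by simp [hq])
    simp only [pvGo]
    cases hget : PySem.List.pyGet? p (-1) with
    | none => exact ih nxt been res shortest hps h2 h3
    | some cur =>
      by_cases htp : tp.contains cur
      · simp only [htp, if_true]
        refine ih nxt been _ _ hps h2 (Or.inr ?_)
        rw [hp]; push_cast; rfl
      · simp only [htp, Bool.false_eq_true, if_false]
        by_cases hbeen : been.contains cur
        · simp only [hbeen, if_true]
          exact ih nxt been res shortest hps h2 h3
        · simp only [hbeen, Bool.false_eq_true, if_false]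
          refine ih _ _ res shortest hps ?_ h3
          intro q hq
          rcases pvGo_mem_fold _ p _ _ hq with h | ⟨n, rfl⟩
          · exact h2 q h
          · simp [hp]

theorem pvInner (tp : List (Int × Int)) (F : Nat) (d : Nat) (hdF : d < F) :
    ∀ (cur nxtB : List (List (Int × Int))) (been : Std.TreeSet (Int × Int) pvCmp)
      (res : List (List (Int × Int))) (shortest : Option Int),
    (∀ p ∈ cur, p.length = d + 1) →
    (shortest = none ∨ shortest = some ((d : Int) + 1)) →
    pvAloop tp F been res shortest
        (cur.map (fun p => ((d : Int), p)) ++ (pvSortPaths nxtB).map (fun p => ((d : Int) + 1, p)))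
      = (match pvGo tp been res shortest nxtB cur with
         | (been2, res2, sh2, nxt2) =>
             pvAloop tp F been2 res2 sh2 ((pvSortPaths nxt2).map (fun p => ((d : Int) + 1, p)))) := by
  intro cur
  induction cur with
  | nil => intro nxtB been res shortest _ _; simp [pvGo]
  | cons p cs ih =>
    intro nxtB been res shortest h1 h2
    have hp : p.length = d + 1 := h1 p (by simp)
    have hcs : ∀ q ∈ cs, q.length = d + 1 := fun q hq => h1 q (by simp [hq])
    have hpne : p ≠ [] := by intro h; rw [h] at hp; simp at hp
    simp only [List.map_cons, List.cons_append]
    rw [pvAloop_cons]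
    rw [if_neg (by omega)]
    have hshort : ∀ sh : Option Int, (sh = none ∨ sh = some ((d : Int) + 1)) →
        (match sh with
          | some s => decide (s < (p.length : Int)) | none => false) = false := by
      intro sh hsh
      rcases hsh with rfl | rfl
      · rfl
      · simp only [decide_eq_false_iff_not, not_lt, hp]
        push_cast; omega
    rw [if_neg (by rw [hshort shortest h2]; simp)]
    rw [PySem.List.pyGet?_neg_one]
    cases hlast : p.getLast? with
    | none => exact absurd (List.getLast?_eq_none_iff.mp hlast) hpne
    | some cur =>
      simp only [pvGo, PySem.List.pyGet?_neg_one, hlast]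
      by_cases htp : tp.contains cur
      · simp only [htp, if_true]
        exact ih nxtB been (res ++ [p]) (some (p.length : Int)) hcs
          (Or.inr (by rw [hp]; push_cast; rfl))
      · simp only [htp, Bool.false_eq_true, if_false]
        by_cases hbeen : been.contains cur
        · simp only [hbeen, if_true]
          exact ih nxtB been res shortest hcs h2
        · simp only [hbeen, Bool.false_eq_true, if_false]
          rw [pvFold_bridge]
          exact ih _ (been.insert cur) res shortest hcs h2

theorem pvOuter (tp : List (Int × Int)) :
    ∀ (f d : Nat) (been : Std.TreeSet (Int × Int) pvCmp) (res : List (List (Int × Int)))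
      (shortest : Option Int) (level : List (List (Int × Int))),
    (∀ p ∈ level, p.length = d + 1) →
    (∀ s, shortest = some s → s ≤ (d : Int)) →
    pvAloop tp (d + f) been res shortest ((pvSortPaths level).map (fun p => ((d : Int), p)))
      = pvBloop tp f been res shortest level := by
  intro f
  induction f with
  | zero =>
    intro d been res shortest level hlen hsh
    simp only [pvBloop]
    cases hs : pvSortPaths level with
    | nil => simp only [List.map_nil]; rw [pvAloop_nil]
    | cons q qs =>
      simp only [List.map_cons]
      rw [pvAloop_cons, if_pos (by omega)]
  | succ f ih =>
    intro d been res shortest level hlen hsh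
    cases level with
    | nil => simp only [pvSortPaths, List.mergeSort_nil, List.map_nil, pvBloop]; rw [pvAloop_nil]
    | cons l0 ls =>
      have hne : pvSortPaths (l0 :: ls) ≠ [] := pvSortPaths_ne_nil (by simp)
      cases shortest with
      | some s =>
        have hsle : s ≤ (d : Int) := hsh s rfl
        simp only [pvBloop, Option.isSome_some, if_true]
        cases hs : pvSortPaths (l0 :: ls) with
        | nil => exact absurd hs hne
        | cons q qs =>
          have hqmem : q ∈ (l0 :: ls) := pvMem_sortPaths.mp (hs ▸ (by simp))
          have hqlen : q.length = d + 1 := hlen q hqmem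
          simp only [List.map_cons]
          rw [pvAloop_cons, if_neg (by omega),
            if_pos (by simp only [hqlen, decide_eq_true_eq]; push_cast; omega)]
      | none =>
        simp only [pvBloop, Option.isSome_none, Bool.false_eq_true, if_false]
        have hmem : ∀ p ∈ pvSortPaths (l0 :: ls), p.length = d + 1 := by
          intro p hp; exact hlen p (pvMem_sortPaths.mp hp)
        have key := pvInner tp (d + (f + 1)) d (by omega) (pvSortPaths (l0 :: ls)) []
          been res none hmem (Or.inl rfl)
        have hnil : pvSortPaths ([] : List (List (Int × Int))) = [] := List.mergeSort_nil
        simp only [hnil, List.map_nil, List.append_nil] at key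
        rw [key]
        have hshape := pvGo_shape tp d (pvSortPaths (l0 :: ls)) [] been res none
          hmem (by simp) (Or.inl rfl)
        cases hgo : pvGo tp been res none [] (pvSortPaths (l0 :: ls)) with
        | mk been2 rest2 =>
          obtain ⟨res2, sh2, nxt2⟩ := rest2
          rw [hgo] at hshape
          dsimp only at hshape
          have harith : d + (f + 1) = (d + 1) + f := by omega
          rw [harith]
          refine ih (d + 1) been2 res2 sh2 nxt2 ?_ ?_
          · intro p hp
            have := hshape.1 p hp
            omega
          · intro s hs2
            rcases hshape.2 with h | h
            · rw [h] at hs2; cases hs2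
            · rw [h] at hs2
              injection hs2 with hv
              push_cast
              omega

-- ===== VERDICT (by name: the statement is the Claim_ definition above) =====
theorem shortestroutes_spec : Claim_equal_shortestroutes := by
  intro mypos targetpos inuse _
  unfold Spec_shortestroutes shortestroutes shortestroutes_alt
  have h := pvOuter targetpos pvFuel 0 (Std.TreeSet.ofList inuse pvCmp) [] none [[mypos]]
    (by simp) (by intro s hs; cases hs)
  have hsingle : pvSortPaths [[mypos]] = [[mypos]] := by simp [pvSortPaths]
  rw [hsingle] at h
  simp only [Nat.zero_add, List.map_cons, List.map_nil, Nat.cast_zero] at h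
  exact h
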